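-- pv_equiv track=rewrite | github.com/shyammarjit/EEG-Emotion-Recognition | main.py | binary_to_four
-- ===== SOURCE A (Python) =====
-- def binary_to_four(val, ar):
--     labels = []
--     assert len(val)==len(ar)
--     for i in range(0, len(val)):
--         if(val[i]==1 and ar[i]==1): # HVHA
--             labels.append(0)
--         elif(val[i]==1 and ar[i]==0): #HVLA
--             labels.append(1)
--         elif(val[i]==0 and ar[i]==1): #LVHA
--             labels.append(2)
--         else: #LVLA
--             labels.append(3)
--     return labels
-- ===== SOURCE B (Python) =====
-- # Initialise-then-overwrite: start from all-3 labels and run one overwrite pass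
-- # per explicit class pattern, instead of a single pass with a 4-way branch cascade.
-- def binary_to_four(val, ar):
--     assert len(val) == len(ar)
--     labels = [3] * len(val)
--     for cls, (v0, a0) in enumerate([(1, 1), (1, 0), (0, 1)]):
--         for i, (v, a) in enumerate(zip(val, ar)):
--             if v == v0 and a == a0:
--                 labels[i] = cls
--     return labels
-- ===== Notes on version B (the rewrite author's own statement) =====
-- stated objective: alternative
-- what changed: Instead of one pass deciding each label with a 4-way branch cascade, B initialises the whole label array to the default class 3 and then runs one overwrite pass per explicit class pattern (1,1)->0, (1,0)->1, (0,1)->2; the patterns are disjoint so the staged overwrites reproduce A's value exactly.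
import Mathlib
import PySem

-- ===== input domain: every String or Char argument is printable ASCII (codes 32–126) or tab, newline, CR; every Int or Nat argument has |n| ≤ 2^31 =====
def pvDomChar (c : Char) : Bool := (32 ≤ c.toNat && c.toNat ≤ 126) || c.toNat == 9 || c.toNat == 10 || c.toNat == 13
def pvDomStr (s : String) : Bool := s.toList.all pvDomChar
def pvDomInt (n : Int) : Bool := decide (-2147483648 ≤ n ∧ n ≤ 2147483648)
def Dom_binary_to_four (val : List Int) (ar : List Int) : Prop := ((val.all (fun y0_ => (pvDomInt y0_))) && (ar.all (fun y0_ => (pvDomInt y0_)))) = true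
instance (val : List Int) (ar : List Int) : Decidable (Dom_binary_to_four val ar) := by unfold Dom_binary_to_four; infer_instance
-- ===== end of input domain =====

-- ===== PORT A =====
-- B changes: initialise all labels to the default class 3, then one overwrite pass per
-- explicit class pattern, instead of a single pass with a 4-way branch cascade (objective: alternative).
-- literal port of A: index loop over range(len(val)), appending by the branch cascade
def binary_to_four (val : List Int) (ar : List Int) : List Int :=
  (PySem.List.pyRange 0 (val.length) 1).foldl (fun labels i =>
    let v := PySem.List.pyGetD val i 0   -- in range for every i of the loop under Pre_
    let a := PySem.List.pyGetD ar i 0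
    if v = 1 ∧ a = 1 then labels ++ [0]
    else if v = 1 ∧ a = 0 then labels ++ [1]
    else if v = 0 ∧ a = 1 then labels ++ [2]
    else labels ++ [3]) []

-- ===== PORT B =====
-- literal port of Source B: labels = [3]*n, then for each (cls,(v0,a0)) an overwrite pass over
-- enumerate(zip(val, ar)).  q.1 comes from enumerate so q.1 ≥ 0 and .toNat is exact here.
def binary_to_four_alt (val : List Int) (ar : List Int) : List Int :=
  (PySem.List.enumerate [(((1:Int), (1:Int))), (1, 0), (0, 1)] 0).foldl
    (fun labels p =>
      (PySem.List.enumerate (val.zip ar) 0).foldl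
        (fun ls q =>
          if q.2.1 = p.2.1 ∧ q.2.2 = p.2.2 then ls.set q.1.toNat p.1 else ls)
        labels)
    (List.replicate val.length 3)

-- ===== PRECONDITION & SPEC =====
-- Pre_ excludes exactly the inputs where A's assert raises (unequal lengths).
def Pre_binary_to_four (val : List Int) (ar : List Int) : Prop := val.length = ar.length
instance (val : List Int) (ar : List Int) : Decidable (Pre_binary_to_four val ar) := by unfold Pre_binary_to_four; infer_instance
def pvWitness_binary_to_four : List Int × List Int := ([1, 1, 0, 0, 2], [1, 0, 1, 0, 1])

def Spec_binary_to_four (val : List Int) (ar : List Int) (out : List Int) : Prop := out = binary_to_four_alt val ar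
instance (val : List Int) (ar : List Int) (out : List Int) : Decidable (Spec_binary_to_four val ar out) := by unfold Spec_binary_to_four; infer_instance

-- ===== CLAIM (what is proved, stated in full; the proofs are below) =====
def Claim_equal_binary_to_four : Prop := ∀ (val : List Int) (ar : List Int), Dom_binary_to_four val ar → Pre_binary_to_four val ar → Spec_binary_to_four val ar (binary_to_four val ar)

-- ===== LEMMAS AND PROOFS =====

-- one overwrite pass preserves the length of the label list
theorem pass_length (v0 a0 cls : Int) :
    ∀ (es : List (Int × (Int × Int))) (ls : List Int),
    (es.foldl (fun ls q => if q.2.1 = v0 ∧ q.2.2 = a0 then ls.set q.1.toNat cls else ls) ls).length = ls.length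
  | [], _ => rfl
  | e :: es, ls => by
    rw [List.foldl_cons, pass_length v0 a0 cls es]
    split <;> simp

-- the k-th entry after one overwrite pass over enumerate zs off
theorem pass_getD (v0 a0 cls : Int) :
    ∀ (zs : List (Int × Int)) (off : Nat) (ls : List Int) (k : Nat),
    ((PySem.List.enumerate zs (off : Int)).foldl
        (fun ls q => if q.2.1 = v0 ∧ q.2.2 = a0 then ls.set q.1.toNat cls else ls) ls).getD k 0
      = if off ≤ k ∧ k - off < zs.length ∧ (zs.getD (k - off) (0, 0)).1 = v0 ∧
            (zs.getD (k - off) (0, 0)).2 = a0 ∧ k < ls.length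
        then cls else ls.getD k 0 := by
  intro zs
  induction zs with
  | nil =>
    intro off ls k
    simp [PySem.List.enumerate_nil]
  | cons z zs ih =>
    intro off ls k
    rw [PySem.List.enumerate_cons, List.foldl_cons]
    have hcast : ((off : Int) + 1) = ((off + 1 : Nat) : Int) := by push_cast; ring
    rw [hcast]
    set ls' : List Int := if z.1 = v0 ∧ z.2 = a0 then ls.set (off : Int).toNat cls else ls with hls'
    have hlen' : ls'.length = ls.length := by rw [hls']; split <;> simp
    rw [ih (off + 1) ls' k]
    rcases Nat.lt_or_ge k off with hk | hk
    · -- k below the pass range: nothing changes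
      have h1 : ¬ (off + 1 ≤ k ∧ k - (off + 1) < zs.length ∧ (zs.getD (k - (off + 1)) (0, 0)).1 = v0 ∧ (zs.getD (k - (off + 1)) (0, 0)).2 = a0 ∧ k < ls'.length) := by
        rintro ⟨h, -⟩; omega
      have h2 : ¬ (off ≤ k ∧ k - off < (z :: zs).length ∧ ((z :: zs).getD (k - off) (0, 0)).1 = v0 ∧ ((z :: zs).getD (k - off) (0, 0)).2 = a0 ∧ k < ls.length) := by
        rintro ⟨h, -⟩; omega
      rw [if_neg h1, if_neg h2, hls']
      split
      · rw [List.getD, List.getD, List.getElem?_set_ne (by simp; omega)]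
      · rfl
    rcases Nat.eq_or_lt_of_le hk with rfl | hklt
    · -- k = off: this step's element decides
      have h1 : ¬ (off + 1 ≤ off ∧ off - (off + 1) < zs.length ∧ (zs.getD (off - (off + 1)) (0, 0)).1 = v0 ∧ (zs.getD (off - (off + 1)) (0, 0)).2 = a0 ∧ off < ls'.length) := by
        rintro ⟨h, -⟩; omega
      rw [if_neg h1, hls']
      simp only [Nat.sub_self, List.getD_cons_zero, List.length_cons, Int.toNat_natCast]
      by_cases hz : z.1 = v0 ∧ z.2 = a0
      · rw [if_pos hz]
        by_cases hkl : off < ls.length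
        · rw [if_pos ⟨le_refl _, by omega, hz.1, hz.2, hkl⟩]
          rw [List.getD, List.getElem?_set_self]
          · rfl
          · exact hkl
        · rw [if_neg (by rintro ⟨-, -, -, -, h⟩; exact hkl h)]
          rw [List.set_eq_of_length_le (by omega)]
      · rw [if_neg hz, if_neg (by rintro ⟨-, -, ha, hb, -⟩; exact hz ⟨ha, hb⟩)]
    · -- k > off: handled by the recursive pass shifted by one
      have hsub : k - off = (k - (off + 1)) + 1 := by omega
      have hcons : ((z :: zs).getD (k - off) (0, 0)) = zs.getD (k - (off + 1)) (0, 0) := by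
        rw [hsub]; rfl
      have hget' : ls'.getD k 0 = ls.getD k 0 := by
        rw [hls']; split
        · rw [List.getD, List.getD, List.getElem?_set_ne (by simp; omega)]
        · rfl
      rw [hlen', hget', hcons]
      congr 1
      simp only [List.length_cons, eq_iff_iff]
      constructor
      · rintro ⟨-, h2, h3, h4, h5⟩; exact ⟨by omega, by omega, h3, h4, h5⟩
      · rintro ⟨-, h2, h3, h4, h5⟩; exact ⟨by omega, by omega, h3, h4, h5⟩

theorem ports_eq (val ar : List Int) (hpre : val.length = ar.length) :
    binary_to_four val ar = binary_to_four_alt val ar := by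
  unfold binary_to_four binary_to_four_alt
  have hbody : (fun (labels : List Int) (i : Int) =>
      let v := PySem.List.pyGetD val i 0
      let a := PySem.List.pyGetD ar i 0
      if v = 1 ∧ a = 1 then labels ++ [0]
      else if v = 1 ∧ a = 0 then labels ++ [1]
      else if v = 0 ∧ a = 1 then labels ++ [2]
      else labels ++ [3]) =
      (fun labels i => labels ++
        [if PySem.List.pyGetD val i 0 = 1 ∧ PySem.List.pyGetD ar i 0 = 1 then 0
         else if PySem.List.pyGetD val i 0 = 1 ∧ PySem.List.pyGetD ar i 0 = 0 then 1
         else if PySem.List.pyGetD val i 0 = 0 ∧ PySem.List.pyGetD ar i 0 = 1 then 2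
         else 3]) := by
    funext labels i; dsimp only; split_ifs <;> rfl
  rw [hbody, PySem.List.foldl_append_singleton_eq_map, List.nil_append]
  have houter : PySem.List.enumerate [(((1:Int), (1:Int))), (1, 0), (0, 1)] (0 : Int) =
      [((0:Int), ((1:Int), (1:Int))), (1, (1, 0)), (2, (0, 1))] := by decide
  rw [houter]
  simp only [List.foldl_cons, List.foldl_nil]
  set zs := val.zip ar with hzs
  have hzslen : zs.length = val.length := by
    rw [hzs, List.length_zip]; omega
  set L0 := List.replicate val.length (3:Int) with hL0
  set r1 := (PySem.List.enumerate zs 0).foldl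
      (fun ls q => if q.2.1 = 1 ∧ q.2.2 = 1 then ls.set q.1.toNat 0 else ls) L0 with hr1
  set r2 := (PySem.List.enumerate zs 0).foldl
      (fun ls q => if q.2.1 = 1 ∧ q.2.2 = 0 then ls.set q.1.toNat 1 else ls) r1 with hr2
  set r3 := (PySem.List.enumerate zs 0).foldl
      (fun ls q => if q.2.1 = 0 ∧ q.2.2 = 1 then ls.set q.1.toNat 2 else ls) r2 with hr3
  have hlen1 : r1.length = val.length := by rw [hr1, pass_length, hL0, List.length_replicate]
  have hlen2 : r2.length = val.length := by rw [hr2, pass_length]; exact hlen1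
  have hlen3 : r3.length = val.length := by rw [hr3, pass_length]; exact hlen2
  apply List.ext_getElem
  · simp [hlen3]
  · intro k hk1 hk2
    have hklen : k < val.length := by simpa using hk1
    have hka : k < ar.length := by omega
    have hzk : zs.getD k ((0:Int), (0:Int)) = (val[k], ar[k]) := by
      rw [hzs, List.getD_eq_getElem _ _ (by rw [List.length_zip]; omega), List.getElem_zip]
    have hL0D : L0.getD k 0 = 3 := by
      rw [hL0, List.getD_eq_getElem _ _ (by simpa using hklen), List.getElem_replicate]
    have e1 : r1.getD k 0 = if val[k] = 1 ∧ ar[k] = 1 then 0 else 3 := by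
      rw [hr1]
      have h := pass_getD 1 1 0 zs 0 L0 k
      simp only [Nat.cast_zero, Nat.sub_zero, Nat.zero_le, true_and] at h
      rw [h, hzk, hL0D]
      have hc1 : k < zs.length := by omega
      have hc2 : k < L0.length := by simp [hL0, hklen]
      simp only [hc1, hc2, and_true, true_and]
    have e2 : r2.getD k 0 = if val[k] = 1 ∧ ar[k] = 0 then 1 else r1.getD k 0 := by
      rw [hr2]
      have h := pass_getD 1 0 1 zs 0 r1 k
      simp only [Nat.cast_zero, Nat.sub_zero, Nat.zero_le, true_and] at h
      rw [h, hzk]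
      have hc1 : k < zs.length := by omega
      have hc2 : k < r1.length := by omega
      simp only [hc1, hc2, and_true, true_and]
    have e3 : r3.getD k 0 = if val[k] = 0 ∧ ar[k] = 1 then 2 else r2.getD k 0 := by
      rw [hr3]
      have h := pass_getD 0 1 2 zs 0 r2 k
      simp only [Nat.cast_zero, Nat.sub_zero, Nat.zero_le, true_and] at h
      rw [h, hzk]
      have hc1 : k < zs.length := by omega
      have hc2 : k < r2.length := by omega
      simp only [hc1, hc2, and_true, true_and]
    rw [← List.getD_eq_getElem r3 0 hk2, e3, e2, e1]
    simp only [List.getElem_map, PySem.List.getElem_pyRange_one, zero_add]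
    have hv : PySem.List.pyGetD val (k : Int) 0 = val[k] := by
      rw [PySem.List.pyGetD_natCast]; exact List.getD_eq_getElem _ _ hklen
    have ha : PySem.List.pyGetD ar (k : Int) 0 = ar[k] := by
      rw [PySem.List.pyGetD_natCast]; exact List.getD_eq_getElem _ _ hka
    rw [hv, ha]
    split_ifs <;> omega

-- ===== VERDICT (by name: the statement is the Claim_ definition above) =====
theorem binary_to_four_spec : Claim_equal_binary_to_four := by
  intro val ar _ hpre
  unfold Spec_binary_to_four
  exact ports_eq val ar hpre
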